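-- pv_equiv track=rewrite | github.com/oVirt/fabric-ovirt | fabric_ovirt/lib/remote_files.py | _strip_gpg_wrappers
-- ===== SOURCE A (Python) =====
-- def _strip_gpg_wrappers(lines):
--     """Strip GPG signiture headers and blocks from input lines
--
--     :param Iterable lines: Lines of text
--     :rtype: Iterator
--     :returns: Iterator over non-signiture or header lines
--     """
--     MBEGIN = '-----BEGIN PGP SIGNED MESSAGE-----'
--     SBEGIN = '-----BEGIN PGP SIGNATURE-----'
--     SEND = '-----END PGP SIGNATURE-----'
--
--     line_i = iter(lines)
--     try:
--         while True:
--             line = next(line_i)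
--             while line.rstrip() != MBEGIN:
--                 yield line
--                 line = next(line_i)
--             next(line_i)
--             next(line_i)
--             line = next(line_i)
--             while line.rstrip() != SBEGIN:
--                 yield line
--                 line = next(line_i)
--             while line.rstrip() != SEND:
--                 line = next(line_i)
--     except StopIteration:
--         pass
-- ===== SOURCE B (Python) =====
-- def _strip_gpg_wrappers(lines):
--     """Strip GPG signature headers and blocks: single flat for-loop state machine."""
--     MBEGIN = '-----BEGIN PGP SIGNED MESSAGE-----'
--     SBEGIN = '-----BEGIN PGP SIGNATURE-----'
--     SEND = '-----END PGP SIGNATURE-----'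
--     NORMAL, SKIP_HEADER, CONTENT, SIGNATURE = 0, 1, 2, 3
--
--     state = NORMAL
--     skip = 0
--     for line in lines:
--         if state == NORMAL:
--             if line.rstrip() == MBEGIN:
--                 state, skip = SKIP_HEADER, 2
--             else:
--                 yield line
--         elif state == SKIP_HEADER:
--             skip -= 1
--             if skip == 0:
--                 state = CONTENT
--         elif state == CONTENT:
--             if line.rstrip() == SBEGIN:
--                 state = SIGNATURE
--             else:
--                 yield line
--         else:  # SIGNATURE
--             if line.rstrip() == SEND:
--                 state = NORMAL
-- ===== Notes on version B (the rewrite author's own statement) =====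
-- stated objective: simpler
-- what changed: Replaced A's nested-while generator with try/except StopIteration and repeated next() calls by a single flat for-loop driving an explicit four-state machine (NORMAL/SKIP_HEADER/CONTENT/SIGNATURE) with an integer skip counter.
import Mathlib
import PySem

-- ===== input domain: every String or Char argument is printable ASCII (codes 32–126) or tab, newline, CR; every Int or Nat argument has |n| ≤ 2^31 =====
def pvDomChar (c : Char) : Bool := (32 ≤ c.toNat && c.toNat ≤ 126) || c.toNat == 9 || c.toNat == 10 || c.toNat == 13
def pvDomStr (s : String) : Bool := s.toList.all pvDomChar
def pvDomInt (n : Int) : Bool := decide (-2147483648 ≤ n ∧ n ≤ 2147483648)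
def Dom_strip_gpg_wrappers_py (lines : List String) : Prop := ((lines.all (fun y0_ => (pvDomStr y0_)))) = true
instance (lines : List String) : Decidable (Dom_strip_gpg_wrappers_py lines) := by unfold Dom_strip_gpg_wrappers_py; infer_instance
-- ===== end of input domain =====

-- ===== PORT A =====
-- B rewrites A's nested-while generator as a single flat for-loop state machine (objective: simpler).
-- A's helpers: mutual recursion mirroring A's nested whiles / consecutive next() calls.
mutual
-- outer loop + first inner while: yield until MBEGIN
def pvANormal : List String → List String
  | [] => []
  | l :: rest =>
    if PySem.Str.rstrip l = "-----BEGIN PGP SIGNED MESSAGE-----" then pvASkip2 rest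
    else l :: pvANormal rest
-- first next(line_i) after MBEGIN
def pvASkip2 : List String → List String
  | [] => []
  | _ :: rest => pvASkip1 rest
-- second next(line_i) after MBEGIN
def pvASkip1 : List String → List String
  | [] => []
  | _ :: rest => pvAContent rest
-- second inner while: yield until SBEGIN
def pvAContent : List String → List String
  | [] => []
  | l :: rest =>
    if PySem.Str.rstrip l = "-----BEGIN PGP SIGNATURE-----" then pvASig rest
    else l :: pvAContent rest
-- third inner while: drop until SEND, then back to the outer loop
def pvASig : List String → List String
  | [] => []
  | l :: rest =>
    if PySem.Str.rstrip l = "-----END PGP SIGNATURE-----" then pvANormal rest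
    else pvASig rest
end

def strip_gpg_wrappers_py (lines : List String) : List String := pvANormal lines

-- ===== PORT B =====
-- one step of B's flat state machine: state 0=NORMAL, 1=SKIP_HEADER (with counter), 2=CONTENT, 3=SIGNATURE
def pvBStep (st : Int × Int × List String) (line : String) : Int × Int × List String :=
  let state := st.1
  let skip := st.2.1
  let out := st.2.2
  if state == 0 then
    if PySem.Str.rstrip line == "-----BEGIN PGP SIGNED MESSAGE-----" then (1, 2, out)
    else (state, skip, out ++ [line])
  else if state == 1 then
    if skip - 1 == 0 then (2, skip - 1, out) else (state, skip - 1, out)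
  else if state == 2 then
    if PySem.Str.rstrip line == "-----BEGIN PGP SIGNATURE-----" then (3, skip, out)
    else (state, skip, out ++ [line])
  else
    if PySem.Str.rstrip line == "-----END PGP SIGNATURE-----" then (0, skip, out)
    else st

def strip_gpg_wrappers_py_alt (lines : List String) : List String :=
  (lines.foldl pvBStep (0, 0, [])).2.2

def Spec_strip_gpg_wrappers_py (lines : List String) (out : List String) : Prop := out = strip_gpg_wrappers_py_alt lines
instance (lines : List String) (out : List String) : Decidable (Spec_strip_gpg_wrappers_py lines out) := by unfold Spec_strip_gpg_wrappers_py; infer_instance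

-- ===== CLAIM (what is proved, stated in full; the proofs are below) =====
def Claim_equal_strip_gpg_wrappers_py : Prop := ∀ (lines : List String), Dom_strip_gpg_wrappers_py lines → Spec_strip_gpg_wrappers_py lines (strip_gpg_wrappers_py lines)

-- ===== LEMMAS AND PROOFS =====
-- Invariant: from each of B's reachable machine states, the fold computes the
-- corresponding A-side phase function, appended to the output accumulated so far.
theorem pvInv (lines : List String) : ∀ (out : List String) (k : Int),
    (lines.foldl pvBStep (0, k, out)).2.2 = out ++ pvANormal lines ∧
    (lines.foldl pvBStep (1, 2, out)).2.2 = out ++ pvASkip2 lines ∧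
    (lines.foldl pvBStep (1, 1, out)).2.2 = out ++ pvASkip1 lines ∧
    (lines.foldl pvBStep (2, k, out)).2.2 = out ++ pvAContent lines ∧
    (lines.foldl pvBStep (3, k, out)).2.2 = out ++ pvASig lines := by
  induction lines with
  | nil => intro out k; simp [pvANormal, pvASkip2, pvASkip1, pvAContent, pvASig]
  | cons l rest ih =>
    intro out k
    refine ⟨?_, ?_, ?_, ?_, ?_⟩
    · simp only [List.foldl_cons, pvBStep, pvANormal]
      by_cases h : PySem.Str.rstrip l = "-----BEGIN PGP SIGNED MESSAGE-----"
      · simp [h, (ih out 2).2.1]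
      · simp [h, (ih (out ++ [l]) k).1]
    · simpa [List.foldl_cons, pvBStep, pvASkip2] using (ih out 1).2.2.1
    · simpa [List.foldl_cons, pvBStep, pvASkip1] using (ih out 0).2.2.2.1
    · simp only [List.foldl_cons, pvBStep, pvAContent]
      by_cases h : PySem.Str.rstrip l = "-----BEGIN PGP SIGNATURE-----"
      · simp [h, (ih out k).2.2.2.2]
      · simp [h, (ih (out ++ [l]) k).2.2.2.1]
    · simp only [List.foldl_cons, pvBStep, pvASig]
      by_cases h : PySem.Str.rstrip l = "-----END PGP SIGNATURE-----"
      · simp [h, (ih out k).1]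
      · simp [h, (ih out k).2.2.2.2]

-- ===== VERDICT (by name: the statement is the Claim_ definition above) =====
theorem strip_gpg_wrappers_py_spec : Claim_equal_strip_gpg_wrappers_py := by
  intro lines _
  unfold Spec_strip_gpg_wrappers_py strip_gpg_wrappers_py strip_gpg_wrappers_py_alt
  simpa using ((pvInv lines [] 0).1).symm
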